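-- pv_equiv track=rewrite | github.com/joho54/jungle-backjoon | 백준/Silver/3187. 양치기 꿍/양치기 꿍.py | solve
-- ===== SOURCE A (Python) =====
-- from collections import deque
--
-- def bfs(r, c, x, y, grid:list, visited: list):
--     queue = deque()
--     queue.append((x,y))
--     visited[x][y] = True
--     sheep, wolves = 0, 0
--     while queue:
--         x, y = queue.popleft()
--         if grid[x][y] == 'k': sheep += 1
--         elif grid[x][y] == 'v': wolves += 1
--
--         for dx, dy in zip([0 ,0, -1, 1], [1, -1, 0, 0]):
--             nx, ny = x + dx, y + dy
--             if 0 <= nx < r and 0 <= ny < c and grid[nx][ny] != '#' and not visited[nx][ny]: # 범위 내에 있고, 울타리가 아니고, 방문하지 않았다면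
--                 visited[nx][ny] = True
--                 queue.append((nx, ny))
--     if sheep > wolves:
--         wolves = 0
--     else:
--         sheep = 0
--     return sheep, wolves
--
-- def solve(r: int, c: int, grid: list):
--     visited = [[False] * c for _ in range(r)]
--     total_sheep, total_wolves = 0, 0
--     for i in range(r):
--         for j in range(c):
--             if grid[i][j] != '#' and not visited[i][j]:
--                 sheep, wolves =  bfs(r, c, i, j, grid, visited)
--                 total_sheep += sheep
--                 total_wolves += wolves
--     return f'{total_sheep} {total_wolves}'
-- ===== SOURCE B (Python) =====
-- def solve(r: int, c: int, grid: list):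
--     # synchronous min-label propagation to a fixpoint, then per-label tallies
--     labels = {}
--     for i in range(r):
--         for j in range(c):
--             if grid[i][j] != '#':
--                 labels[(i, j)] = i * c + j
--     while True:
--         new = {}
--         for (i, j), l in labels.items():
--             m = l
--             for nb in ((i, j + 1), (i, j - 1), (i - 1, j), (i + 1, j)):
--                 v = labels.get(nb)
--                 if v is not None and v < m:
--                     m = v
--             new[(i, j)] = m
--         if new == labels:
--             break
--         labels = new
--     sheep = {}
--     wolves = {}
--     for (i, j), l in labels.items():
--         ch = grid[i][j]
--         if ch == 'k':
--             sheep[l] = sheep.get(l, 0) + 1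
--         elif ch == 'v':
--             wolves[l] = wolves.get(l, 0) + 1
--     total_sheep, total_wolves = 0, 0
--     for l in dict.fromkeys(labels.values()):
--         s = sheep.get(l, 0)
--         w = wolves.get(l, 0)
--         if s > w:
--             total_sheep += s
--         else:
--             total_wolves += w
--     return f'{total_sheep} {total_wolves}'
-- ===== Notes on version B (the rewrite author's own statement) =====
-- stated objective: alternative
-- what changed: A's per-component BFS flood fill (deque worklist + visited matrix, counting sheep/wolves while popping) is replaced by a worklist-free connected-components algorithm: every open cell starts with label i*c+j, synchronous minimum-label passes run to a fixpoint, and the per-label tallies of 'k' and 'v' are then summed with the same >-rule; the Lean proof shows the stable labelling identifies exactly A's components.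
import Mathlib
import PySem

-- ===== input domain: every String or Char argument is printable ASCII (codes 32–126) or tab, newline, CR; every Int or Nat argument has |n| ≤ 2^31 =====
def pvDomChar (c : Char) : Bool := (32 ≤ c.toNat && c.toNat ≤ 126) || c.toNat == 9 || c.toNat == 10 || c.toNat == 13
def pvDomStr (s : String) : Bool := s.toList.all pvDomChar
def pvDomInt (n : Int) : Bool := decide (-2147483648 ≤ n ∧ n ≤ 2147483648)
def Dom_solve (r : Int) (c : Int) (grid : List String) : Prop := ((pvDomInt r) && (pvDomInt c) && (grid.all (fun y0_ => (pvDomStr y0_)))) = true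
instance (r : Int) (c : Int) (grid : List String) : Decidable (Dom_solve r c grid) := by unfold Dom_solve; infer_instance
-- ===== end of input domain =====

-- B replaces A's BFS flood fill by a wholly different connected-components algorithm:
-- synchronous minimum-label propagation to a fixpoint, then per-label tallies; objective: alternative.

-- ===== PORT A =====
-- grid[x][y]; every access the claims cover is in range (Pre_), the '#' default is never read there
def cellAt (grid : List String) (x y : Int) : Char :=
  (PySem.Str.pyGet? (PySem.List.pyGetD grid x "") y).getD '#'

-- visited[x][y] (default true: out-of-range is never unvisited, matching A's bound guards)
def vGet (v : List (List Bool)) (x y : Int) : Bool :=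
  PySem.List.pyGetD (PySem.List.pyGetD v x []) y true

-- visited[x][y] = True
def vSet (v : List (List Bool)) (x y : Int) : List (List Bool) :=
  PySem.List.pySetD v x (PySem.List.pySetD (PySem.List.pyGetD v x []) y true)

-- termination measure helper for A's while loop: number of False entries
def unvis (v : List (List Bool)) : Nat := (v.map (fun row => row.countP (fun b => !b))).sum
def dirsA : List (Int × Int) := List.zip [0, 0, -1, 1] [1, -1, 0, 0]

-- body of A's inner 'for dx, dy in zip(...)'
def pushA (r c : Int) (grid : List String) (x y : Int)
    (qv : List (Int × Int) × List (List Bool)) (d : Int × Int) :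
    List (Int × Int) × List (List Bool) :=
  if 0 ≤ x + d.1 ∧ x + d.1 < r ∧ 0 ≤ y + d.2 ∧ y + d.2 < c ∧
      cellAt grid (x + d.1) (y + d.2) ≠ '#' ∧ vGet qv.2 (x + d.1) (y + d.2) = false then
    (qv.1 ++ [(x + d.1, y + d.2)], vSet qv.2 (x + d.1) (y + d.2))
  else qv
def bfsLoopF (r c : Int) (grid : List String) : Nat → List (Int × Int) →
    List (List Bool) → Int → Int → (Int × Int) × List (List Bool)
  | 0, _, visited, s, w => ((s, w), visited)
  | _ + 1, [], visited, s, w => ((s, w), visited)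
  | fuel + 1, (x, y) :: rest, visited, s, w =>
    let s' := if cellAt grid x y = 'k' then s + 1 else s
    let w' := if cellAt grid x y = 'k' then w else if cellAt grid x y = 'v' then w + 1 else w
    let qv := dirsA.foldl (pushA r c grid x y) (rest, visited)
    bfsLoopF r c grid fuel qv.1 qv.2 s' w'

-- the fuel equals the loop measure, which foldA_measure shows decreases by exactly 1 per
-- iteration, so the loop always runs to completion (proved by bfsLoopF_spec below)
def bfsLoop (r c : Int) (grid : List String) (queue : List (Int × Int))
    (visited : List (List Bool)) (s w : Int) : (Int × Int) × List (List Bool) :=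
  bfsLoopF r c grid (unvis visited + queue.length) queue visited s w
def bfs (r c x y : Int) (grid : List String) (visited : List (List Bool)) :
    (Int × Int) × List (List Bool) :=
  let res := bfsLoop r c grid [(x, y)] (vSet visited x y) 0 0
  (if res.1.1 > res.1.2 then (res.1.1, 0) else (0, res.1.2), res.2)
def solve (r : Int) (c : Int) (grid : List String) : String :=
  let visited0 : List (List Bool) :=
    (PySem.List.pyRange 0 r 1).map (fun _ => PySem.List.pyRepeat [false] c)
  let st := (PySem.List.pyRange 0 r 1).foldl (fun acc i =>
    (PySem.List.pyRange 0 c 1).foldl (fun acc2 j =>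
      if cellAt grid i j ≠ '#' ∧ vGet acc2.1 i j = false then
        let res := bfs r c i j grid acc2.1
        (res.2, acc2.2.1 + res.1.1, acc2.2.2 + res.1.2)
      else acc2) acc) (visited0, 0, 0)
  PySem.Int.toStr st.2.1 ++ " " ++ PySem.Int.toStr st.2.2

-- ===== PORT B =====
-- the four neighbours tried by Source B, in Source B's order
def neighborsB (x y : Int) : List (Int × Int) := [(x, y + 1), (x, y - 1), (x - 1, y), (x + 1, y)]

-- first loop of Source B: labels[(i, j)] = i * c + j for every open cell, row-major
def initLabels (r c : Int) (grid : List String) : PySem.Dict (Int × Int) Int :=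
  (PySem.List.pyRange 0 r 1).foldl (fun d i =>
    (PySem.List.pyRange 0 c 1).foldl (fun d2 j =>
      if cellAt grid i j ≠ '#' then d2.insert (i, j) (i * c + j) else d2) d) PySem.Dict.empty

-- Source B's inner neighbour scan: m = min of own label and the labels of present neighbours
def minNbr (labels : PySem.Dict (Int × Int) Int) (i j l : Int) : Int :=
  (neighborsB i j).foldl (fun m nb =>
    match labels.get? nb with
    | some v => if v < m then v else m
    | none => m) l

-- one synchronous pass: new[(i, j)] = minNbr (keys kept in order, so Python's order-insensitive
-- dict == coincides with list equality of the items, used below)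
def passLabels (labels : PySem.Dict (Int × Int) Int) : PySem.Dict (Int × Int) Int :=
  labels.items.foldl (fun nd kv => nd.insert kv.1 (minNbr labels kv.1.1 kv.1.2 kv.2)) PySem.Dict.empty

-- fuel bound for the 'while True' loop: each non-final pass strictly decreases the sum of the
-- (nonnegative) labels, so labelSum + 1 passes suffice (proved by labLoopF_spec below)
def labelSum (d : PySem.Dict (Int × Int) Int) : Nat := (d.items.map (fun kv => kv.2.toNat)).sum
def labLoopF : Nat → PySem.Dict (Int × Int) Int → PySem.Dict (Int × Int) Int
  | 0, d => d
  | fuel + 1, d =>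
    let nd := passLabels d
    if nd = d then d else labLoopF fuel nd
def labFix (d : PySem.Dict (Int × Int) Int) : PySem.Dict (Int × Int) Int :=
  labLoopF (labelSum d + 1) d

def solve_alt (r : Int) (c : Int) (grid : List String) : String :=
  let labels := labFix (initLabels r c grid)
  let sw := labels.items.foldl (fun sw kv =>
      if cellAt grid kv.1.1 kv.1.2 = 'k' then (sw.1.insert kv.2 (sw.1.getD kv.2 0 + 1), sw.2)
      else if cellAt grid kv.1.1 kv.1.2 = 'v' then (sw.1, sw.2.insert kv.2 (sw.2.getD kv.2 0 + 1))
      else sw)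
    ((PySem.Dict.empty : PySem.Dict Int Int), (PySem.Dict.empty : PySem.Dict Int Int))
  let tot := (PySem.List.dedup labels.values).foldl (fun tw l =>
      if sw.1.getD l 0 > sw.2.getD l 0 then (tw.1 + sw.1.getD l 0, tw.2)
      else (tw.1, tw.2 + sw.2.getD l 0)) ((0 : Int), (0 : Int))
  PySem.Int.toStr tot.1 ++ " " ++ PySem.Int.toStr tot.2

-- ===== PRECONDITION & SPEC =====
-- Pre_ excludes exactly the inputs where the Pythons raise IndexError: when c > 0 the first loop
-- indexes grid[i][j] for every i < r, j < c, so A (and B) return iff r ≤ len(grid) and the first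
-- r rows have length ≥ c (for c ≤ 0 the inner loop is empty and both always return).
def Pre_solve (r : Int) (c : Int) (grid : List String) : Prop :=
  0 < c → (r ≤ (grid.length : Int) ∧ ∀ s ∈ grid.take r.toNat, c ≤ (s.toList.length : Int))
instance (r : Int) (c : Int) (grid : List String) : Decidable (Pre_solve r c grid) := by
  unfold Pre_solve; infer_instance
def pvWitness_solve : Int × Int × List String := (2, 3, ["k.v", "#kv"])
def Spec_solve (r : Int) (c : Int) (grid : List String) (out : String) : Prop := out = solve_alt r c grid
instance (r : Int) (c : Int) (grid : List String) (out : String) : Decidable (Spec_solve r c grid out) := by unfold Spec_solve; infer_instance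

-- ===== CLAIM (what is proved, stated in full; the proofs are below) =====
def Claim_equal_solve : Prop := ∀ (r : Int) (c : Int) (grid : List String), Dom_solve r c grid → Pre_solve r c grid → Spec_solve r c grid (solve r c grid)

-- ===== LEMMAS AND PROOFS =====

lemma vGet_nonneg_eq (v : List (List Bool)) (x y : Int) (hx : 0 ≤ x) (hy : 0 ≤ y) :
    vGet v x y = (v.getD x.toNat []).getD y.toNat true := by
  unfold vGet
  have hx' : x = ((x.toNat : Nat) : Int) := by omega
  have hy' : y = ((y.toNat : Nat) : Int) := by omega
  rw [hx', hy', PySem.List.pyGetD_natCast, PySem.List.pyGetD_natCast]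
  have h1 : ((x.toNat : Int)).toNat = x.toNat := by omega
  have h2 : ((y.toNat : Int)).toNat = y.toNat := by omega
  rw [h1, h2]

lemma vSet_nonneg_eq (v : List (List Bool)) (x y : Int) (hx : 0 ≤ x) (hy : 0 ≤ y) :
    vSet v x y = v.set x.toNat ((v.getD x.toNat []).set y.toNat true) := by
  unfold vSet
  have hx' : x = ((x.toNat : Nat) : Int) := by omega
  have hy' : y = ((y.toNat : Nat) : Int) := by omega
  rw [hx', hy', PySem.List.pyGetD_natCast, PySem.List.pySetD_natCast, PySem.List.pySetD_natCast]
  have h1 : ((x.toNat : Int)).toNat = x.toNat := by omega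
  have h2 : ((y.toNat : Int)).toNat = y.toNat := by omega
  rw [h1, h2]

lemma getD_dichotomy {α : Type} (xs : List α) (n : Nat) (d : α) :
    xs.getD n d = if h : n < xs.length then xs[n] else d := by
  split
  · exact List.getD_eq_getElem xs d ‹_›
  · exact List.getD_eq_default xs d (by omega)

lemma vGet_false_bounds (v : List (List Bool)) (x y : Int) (hx : 0 ≤ x) (hy : 0 ≤ y)
    (h : vGet v x y = false) :
    x.toNat < v.length ∧ y.toNat < (v.getD x.toNat []).length := by
  rw [vGet_nonneg_eq v x y hx hy] at h
  constructor
  · by_contra hc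
    rw [getD_dichotomy v x.toNat [], dif_neg hc] at h
    simp [getD_dichotomy] at h
  · by_contra hc
    rw [getD_dichotomy (v.getD x.toNat []) y.toNat true, dif_neg hc] at h
    cases h

lemma sum_set_nat (xs : List Nat) (n : Nat) (a : Nat) (h : n < xs.length) :
    (xs.set n a).sum + xs[n] = xs.sum + a := by
  have h4 : (xs.take n).sum + (xs.drop n).sum = xs.sum := by
    rw [← List.sum_append, List.take_append_drop]
  have h3 : (xs.drop n).sum = xs[n] + (xs.drop (n+1)).sum := by
    rw [List.drop_eq_getElem_cons h, List.sum_cons]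
  rw [List.set_eq_take_append_cons_drop, if_pos h]
  simp only [List.sum_append, List.sum_cons]
  omega

lemma countP_set_true (row : List Bool) (m : Nat) (hm : m < row.length) (hf : row[m] = false) :
    (row.set m true).countP (fun b => !b) + 1 = row.countP (fun b => !b) := by
  have h4 : (row.take m).countP (fun b => !b) + (row.drop m).countP (fun b => !b) =
      row.countP (fun b => !b) := by
    rw [← List.countP_append, List.take_append_drop]
  have h3 : (row.drop m).countP (fun b => !b) = 1 + (row.drop (m+1)).countP (fun b => !b) := by
    rw [List.drop_eq_getElem_cons hm, List.countP_cons]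
    simp [hf]; omega
  rw [List.set_eq_take_append_cons_drop, if_pos hm]
  simp only [List.countP_append, List.countP_cons]
  simp
  omega

lemma unvis_vSet (v : List (List Bool)) (x y : Int) (hx : 0 ≤ x) (hy : 0 ≤ y)
    (h : vGet v x y = false) : unvis (vSet v x y) + 1 = unvis v := by
  obtain ⟨hxl, hyl⟩ := vGet_false_bounds v x y hx hy h
  rw [vGet_nonneg_eq v x y hx hy, List.getD_eq_getElem v [] hxl] at h
  rw [List.getD_eq_getElem _ true (by rwa [List.getD_eq_getElem v [] hxl] at hyl)] at h
  rw [List.getD_eq_getElem v [] hxl] at hyl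
  unfold unvis
  rw [vSet_nonneg_eq v x y hx hy, List.getD_eq_getElem v [] hxl, List.map_set]
  have hmap : x.toNat < (v.map (fun row => row.countP (fun b => !b))).length := by
    simpa using hxl
  have hs := sum_set_nat (v.map (fun row => row.countP (fun b => !b))) x.toNat
      ((v[x.toNat].set y.toNat true).countP (fun b => !b)) hmap
  have hset := countP_set_true v[x.toNat] y.toNat hyl h
  simp only [List.getElem_map] at hs
  omega

lemma pushA_measure (r c : Int) (grid : List String) (x y : Int)
    (qv : List (Int × Int) × List (List Bool)) (d : Int × Int) :
    unvis (pushA r c grid x y qv d).2 + (pushA r c grid x y qv d).1.length =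
      unvis qv.2 + qv.1.length := by
  unfold pushA
  split
  · rename_i hg
    have := unvis_vSet qv.2 (x + d.1) (y + d.2) hg.1 hg.2.2.1 hg.2.2.2.2.2
    simp only [List.length_append, List.length_cons, List.length_nil]
    omega
  · rfl

lemma foldA_measure (r c : Int) (grid : List String) (x y : Int)
    (l : List (Int × Int)) (qv : List (Int × Int) × List (List Bool)) :
    unvis (l.foldl (pushA r c grid x y) qv).2 + (l.foldl (pushA r c grid x y) qv).1.length =
      unvis qv.2 + qv.1.length := by
  induction l generalizing qv with
  | nil => rfl
  | cons d l ih =>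
    rw [List.foldl_cons, ih (pushA r c grid x y qv d)]
    exact pushA_measure r c grid x y qv d

-- all in-bounds cells in row-major order
def allCells (r c : Int) : List (Int × Int) :=
  (PySem.List.pyRange 0 r 1).flatMap (fun i => (PySem.List.pyRange 0 c 1).map (fun j => (i, j)))

lemma mem_allCells (r c : Int) (p : Int × Int) :
    p ∈ allCells r c ↔ 0 ≤ p.1 ∧ p.1 < r ∧ 0 ≤ p.2 ∧ p.2 < c := by
  obtain ⟨a, b⟩ := p
  simp only [allCells, List.mem_flatMap, List.mem_map, PySem.List.mem_pyRange_one,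
    Prod.mk.injEq]
  constructor
  · rintro ⟨i, hi, j, hj, rfl, rfl⟩; exact ⟨hi.1, hi.2, hj.1, hj.2⟩
  · rintro ⟨h1, h2, h3, h4⟩; exact ⟨a, ⟨h1, h2⟩, b, ⟨h3, h4⟩, rfl, rfl⟩

lemma nodup_allCells (r c : Int) : (allCells r c).Nodup := by
  have : allCells r c = (PySem.List.pyRange 0 r 1).product (PySem.List.pyRange 0 c 1) := rfl
  rw [this]
  exact List.Nodup.product (PySem.List.nodup_pyRange_one 0 r) (PySem.List.nodup_pyRange_one 0 c)

lemma countP_flip {α : Type} {L : List α} {q : α} {f g : α → Bool} (hN : L.Nodup) (hq : q ∈ L)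
    (hsame : ∀ p ∈ L, p ≠ q → g p = f p) (hfq : f q = true) (hgq : g q = false) :
    L.countP g + 1 = L.countP f := by
  induction L with
  | nil => cases hq
  | cons a t ih =>
    rcases List.mem_cons.mp hq with he | hqt
    · subst he
      have hnt : q ∉ t := (List.nodup_cons.mp hN).1
      have : t.countP g = t.countP f := by
        apply List.countP_congr
        intro p hp
        rw [hsame p (List.mem_cons_of_mem q hp) (fun he => hnt (he ▸ hp))]
      simp [List.countP_cons, hfq, hgq, this]
    · have haq : a ≠ q := fun he => (List.nodup_cons.mp hN).1 (he ▸ hqt)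
      have hga : g a = f a := hsame a List.mem_cons_self haq
      have := ih (List.nodup_cons.mp hN).2 hqt
        (fun p hp => hsame p (List.mem_cons_of_mem a hp))
      simp only [List.countP_cons, hga]
      omega

def inb (r c : Int) (p : Int × Int) : Prop := 0 ≤ p.1 ∧ p.1 < r ∧ 0 ≤ p.2 ∧ p.2 < c

def openCell (r c : Int) (grid : List String) (p : Int × Int) : Prop :=
  inb r c p ∧ cellAt grid p.1 p.2 ≠ '#'

def adjC (p q : Int × Int) : Prop :=
  q = (p.1, p.2 + 1) ∨ q = (p.1, p.2 - 1) ∨ q = (p.1 - 1, p.2) ∨ q = (p.1 + 1, p.2)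

def stepC (r c : Int) (grid : List String) (p q : Int × Int) : Prop :=
  openCell r c grid p ∧ openCell r c grid q ∧ adjC p q

def Reach (r c : Int) (grid : List String) (s p : Int × Int) : Prop :=
  Relation.ReflTransGen (stepC r c grid) s p

def markedA (r c : Int) (V : List (List Bool)) (p : Int × Int) : Prop :=
  inb r c p ∧ vGet V p.1 p.2 = true

def cntA (r c : Int) (grid : List String) (ch : Char) (V : List (List Bool)) : Nat :=
  (allCells r c).countP (fun p => vGet V p.1 p.2 && (cellAt grid p.1 p.2 == ch))

lemma reach_open (r c : Int) (grid : List String) (st p : Int × Int)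
    (hst : openCell r c grid st) (h : Reach r c grid st p) : openCell r c grid p := by
  induction h with
  | refl => exact hst
  | tail _ h2 _ => exact h2.2.1

lemma vGet_vSet (v : List (List Bool)) (x y : Int) (hx : 0 ≤ x) (hy : 0 ≤ y)
    (h : vGet v x y = false) (x' y' : Int) (hx' : 0 ≤ x') (hy' : 0 ≤ y') :
    vGet (vSet v x y) x' y' = if x' = x ∧ y' = y then true else vGet v x' y' := by
  obtain ⟨hxl, hyl⟩ := vGet_false_bounds v x y hx hy h
  rw [vGet_nonneg_eq _ _ _ hx' hy', vSet_nonneg_eq v x y hx hy]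
  by_cases hxx : x' = x
  · subst hxx
    rw [List.getD_eq_getElem _ [] (by simpa using hxl), List.getElem_set_self (by simpa using hxl)]
    by_cases hyy : y' = y
    · subst hyy
      rw [List.getD_eq_getElem _ true (by simpa using hyl),
        List.getElem_set_self (by simpa using hyl)]
      simp
    · rw [if_neg (by tauto), vGet_nonneg_eq _ _ _ hx' hy']
      have hne : y'.toNat ≠ y.toNat := by omega
      by_cases hyl' : y'.toNat < (v.getD x'.toNat []).length
      · rw [List.getD_eq_getElem _ true (by simpa using hyl'),
          List.getElem_set_ne (by omega),
          ← List.getD_eq_getElem _ true hyl']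
      · rw [List.getD_eq_default _ true (by simp only [List.length_set]; omega),
          List.getD_eq_default _ true (by omega)]
  · rw [if_neg (by tauto), vGet_nonneg_eq _ _ _ hx' hy']
    have hne : x'.toNat ≠ x.toNat := by omega
    congr 1
    by_cases hxl' : x'.toNat < v.length
    · rw [List.getD_eq_getElem _ [] (by simpa using hxl'),
        List.getElem_set_ne (by omega),
        ← List.getD_eq_getElem _ [] hxl']
    · rw [List.getD_eq_default _ [] (by simp only [List.length_set]; omega),
        List.getD_eq_default _ [] (by omega)]

lemma markedA_vSet (r c : Int) (V : List (List Bool)) (x y : Int) (hinb : inb r c (x, y))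
    (hf : vGet V x y = false) (p : Int × Int) :
    markedA r c (vSet V x y) p ↔ (p = (x, y) ∨ markedA r c V p) := by
  have hx := hinb.1
  have hy := hinb.2.2.1
  constructor
  · rintro ⟨hpin, hv⟩
    rw [vGet_vSet V x y hx hy hf p.1 p.2 hpin.1 hpin.2.2.1] at hv
    by_cases hpq : p.1 = x ∧ p.2 = y
    · left; exact Prod.ext hpq.1 hpq.2
    · right; exact ⟨hpin, by rwa [if_neg hpq] at hv⟩
  · rintro (rfl | ⟨hpin, hv⟩)
    · refine ⟨hinb, ?_⟩
      rw [vGet_vSet V x y hx hy hf x y hx hy]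
      simp
    · refine ⟨hpin, ?_⟩
      rw [vGet_vSet V x y hx hy hf p.1 p.2 hpin.1 hpin.2.2.1]
      split <;> simp [hv]

lemma cntA_vSet (r c : Int) (grid : List String) (ch : Char) (V : List (List Bool)) (x y : Int)
    (hinb : inb r c (x, y)) (hf : vGet V x y = false) :
    cntA r c grid ch (vSet V x y) =
      cntA r c grid ch V + (if cellAt grid x y == ch then 1 else 0) := by
  have hx := hinb.1
  have hy := hinb.2.2.1
  have hq : (x, y) ∈ allCells r c := (mem_allCells r c (x, y)).mpr hinb
  have hsame : ∀ p ∈ allCells r c, p ≠ (x, y) →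
      (vGet (vSet V x y) p.1 p.2 && (cellAt grid p.1 p.2 == ch)) =
      (vGet V p.1 p.2 && (cellAt grid p.1 p.2 == ch)) := by
    intro p hp hpq
    obtain ⟨h1, _, h3, _⟩ := (mem_allCells r c p).mp hp
    rw [vGet_vSet V x y hx hy hf p.1 p.2 h1 h3, if_neg]
    intro hc
    exact hpq (Prod.ext hc.1 hc.2)
  unfold cntA
  cases hch : (cellAt grid x y == ch)
  · rw [if_neg (by simp [hch])]
    apply List.countP_congr
    intro p hp
    by_cases hpq : p = (x, y)
    · subst hpq; simp [hch]
    · rw [hsame p hp hpq]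
  · rw [if_pos (by simp [hch])]
    have := countP_flip (q := (x, y))
      (f := fun p => vGet (vSet V x y) p.1 p.2 && (cellAt grid p.1 p.2 == ch))
      (g := fun p => vGet V p.1 p.2 && (cellAt grid p.1 p.2 == ch))
      (nodup_allCells r c) hq
      (fun p hp hpq => (hsame p hp hpq).symm)
      (by simp [hch, vGet_vSet V x y hx hy hf x y hx hy])
      (by simp [hf])
    omega

structure AInv (r c : Int) (grid : List String) (V0 : List (List Bool)) (st : Int × Int)
    (Q : List (Int × Int)) (V : List (List Bool)) (s w : Int) : Prop where
  qreach : ∀ p ∈ Q, Reach r c grid st p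
  grow   : ∀ p, markedA r c V0 p → markedA r c V p
  sub    : ∀ p, markedA r c V p → markedA r c V0 p ∨ Reach r c grid st p
  stm    : markedA r c V st
  cls    : ∀ p, markedA r c V p → ¬ markedA r c V0 p → p ∉ Q →
             ∀ t, stepC r c grid p t → markedA r c V t
  sK     : s + (cntA r c grid 'k' V0 : Int)
             + (Q.countP (fun p => cellAt grid p.1 p.2 == 'k') : Int) = (cntA r c grid 'k' V : Int)
  sW     : w + (cntA r c grid 'v' V0 : Int)
             + (Q.countP (fun p => cellAt grid p.1 p.2 == 'v') : Int) = (cntA r c grid 'v' V : Int)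

structure AMid (r c : Int) (grid : List String) (V0 : List (List Bool)) (st : Int × Int)
    (x y : Int) (s w : Int) (q : List (Int × Int)) (V : List (List Bool)) : Prop where
  qreach : ∀ p ∈ q, Reach r c grid st p
  grow   : ∀ p, markedA r c V0 p → markedA r c V p
  sub    : ∀ p, markedA r c V p → markedA r c V0 p ∨ Reach r c grid st p
  stm    : markedA r c V st
  cls'   : ∀ p, markedA r c V p → ¬ markedA r c V0 p → p ∉ q → p ≠ (x, y) →
             ∀ t, stepC r c grid p t → markedA r c V t
  sK     : s + (cntA r c grid 'k' V0 : Int)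
             + (q.countP (fun p => cellAt grid p.1 p.2 == 'k') : Int) = (cntA r c grid 'k' V : Int)
  sW     : w + (cntA r c grid 'v' V0 : Int)
             + (q.countP (fun p => cellAt grid p.1 p.2 == 'v') : Int) = (cntA r c grid 'v' V : Int)

lemma pushA_step (r c : Int) (grid : List String) (V0 : List (List Bool)) (st : Int × Int)
    (x y : Int) (s w : Int) (q : List (Int × Int)) (V : List (List Bool)) (d : Int × Int)
    (hst : openCell r c grid st) (hxy : Reach r c grid st (x, y))
    (hadj : adjC (x, y) (x + d.1, y + d.2))
    (m : AMid r c grid V0 st x y s w q V) :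
    AMid r c grid V0 st x y s w (pushA r c grid x y (q, V) d).1 (pushA r c grid x y (q, V) d).2
    ∧ (∀ p, markedA r c V p → markedA r c (pushA r c grid x y (q, V) d).2 p)
    ∧ (∀ t, t = (x + d.1, y + d.2) → stepC r c grid (x, y) t →
        markedA r c (pushA r c grid x y (q, V) d).2 t) := by
  unfold pushA
  split
  · rename_i hg
    obtain ⟨h1, h2, h3, h4, h5, h6⟩ := hg
    have hinbt : inb r c (x + d.1, y + d.2) := ⟨h1, h2, h3, h4⟩
    have hopent : openCell r c grid (x + d.1, y + d.2) := ⟨hinbt, h5⟩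
    have hopenxy : openCell r c grid (x, y) := reach_open r c grid st (x, y) hst hxy
    have hstept : stepC r c grid (x, y) (x + d.1, y + d.2) := ⟨hopenxy, hopent, hadj⟩
    have hreacht : Reach r c grid st (x + d.1, y + d.2) :=
      Relation.ReflTransGen.tail hxy hstept
    have hchar := markedA_vSet r c V (x + d.1) (y + d.2) hinbt h6
    refine ⟨⟨?_, ?_, ?_, ?_, ?_, ?_, ?_⟩, ?_, ?_⟩
    · intro p hp
      rcases List.mem_append.mp hp with hp | hp
      · exact m.qreach p hp
      · rw [List.mem_singleton] at hp; subst hp; exact hreacht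
    · intro p hp; exact (hchar p).mpr (Or.inr (m.grow p hp))
    · intro p hp
      rcases (hchar p).mp hp with rfl | hp
      · exact Or.inr hreacht
      · exact m.sub p hp
    · exact (hchar st).mpr (Or.inr m.stm)
    · intro p hp hp0 hpq hpxy t hstep
      rcases (hchar p).mp hp with rfl | hp
      · exact absurd (List.mem_append.mpr (Or.inr (List.mem_singleton.mpr rfl))) hpq
      · have hq : p ∉ q := fun hm => hpq (List.mem_append.mpr (Or.inl hm))
        exact (hchar t).mpr (Or.inr (m.cls' p hp hp0 hq hpxy t hstep))
    · have hc := cntA_vSet r c grid 'k' V (x + d.1) (y + d.2) hinbt h6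
      have hm := m.sK
      simp only [List.countP_append, List.countP_cons, List.countP_nil] at *
      cases hk : (cellAt grid (x + d.1) (y + d.2) == 'k') <;>
        (rw [hk] at hc; simp only [hk] at *; push_cast [hc]; omega)
    · have hc := cntA_vSet r c grid 'v' V (x + d.1) (y + d.2) hinbt h6
      have hm := m.sW
      simp only [List.countP_append, List.countP_cons, List.countP_nil] at *
      cases hk : (cellAt grid (x + d.1) (y + d.2) == 'v') <;>
        (rw [hk] at hc; simp only [hk] at *; push_cast [hc]; omega)
    · intro p hp; exact (hchar p).mpr (Or.inr hp)
    · intro t ht _; subst ht; exact (hchar _).mpr (Or.inl rfl)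
  · rename_i hg
    refine ⟨m, fun p hp => hp, ?_⟩
    intro t ht hstep
    subst ht
    have hinbt : inb r c (x + d.1, y + d.2) := hstep.2.1.1
    have hcell := hstep.2.1.2
    have hv : vGet V (x + d.1) (y + d.2) = true := by
      cases hvv : vGet V (x + d.1) (y + d.2)
      · exact absurd ⟨hinbt.1, hinbt.2.1, hinbt.2.2.1, hinbt.2.2.2, hcell, hvv⟩ hg
      · rfl
    exact ⟨hinbt, hv⟩

lemma dirsA_eq : dirsA = [((0 : Int), (1 : Int)), (0, -1), (-1, 0), (1, 0)] := rfl

lemma afterFold (r c : Int) (grid : List String) (V0 : List (List Bool)) (st : Int × Int)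
    (x y : Int) (s w : Int) (rest : List (Int × Int)) (V : List (List Bool))
    (hst : openCell r c grid st) (hxy : Reach r c grid st (x, y))
    (m : AMid r c grid V0 st x y s w rest V) :
    AInv r c grid V0 st (dirsA.foldl (pushA r c grid x y) (rest, V)).1
      (dirsA.foldl (pushA r c grid x y) (rest, V)).2 s w := by
  rw [dirsA_eq]
  simp only [List.foldl_cons, List.foldl_nil]
  obtain ⟨m1, mono1, cov1⟩ := pushA_step r c grid V0 st x y s w rest V (0, 1) hst hxy
    (by left; ext <;> simp <;> omega) m
  obtain ⟨m2, mono2, cov2⟩ := pushA_step r c grid V0 st x y s w _ _ (0, -1) hst hxy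
    (by right; left; ext <;> simp <;> omega) m1
  obtain ⟨m3, mono3, cov3⟩ := pushA_step r c grid V0 st x y s w _ _ (-1, 0) hst hxy
    (by right; right; left; ext <;> simp <;> omega) m2
  obtain ⟨m4, mono4, cov4⟩ := pushA_step r c grid V0 st x y s w _ _ (1, 0) hst hxy
    (by right; right; right; ext <;> simp <;> omega) m3
  have hcovAll : ∀ t, stepC r c grid (x, y) t →
      markedA r c (pushA r c grid x y (pushA r c grid x y (pushA r c grid x y
        (pushA r c grid x y (rest, V) (0, 1)) (0, -1)) (-1, 0)) (1, 0)).2 t := by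
    intro t hstep
    rcases hstep.2.2 with ht | ht | ht | ht
    · exact mono4 _ (mono3 _ (mono2 _ (cov1 t (by rw [ht]; ext <;> simp <;> omega) hstep)))
    · exact mono4 _ (mono3 _ (cov2 t (by rw [ht]; ext <;> simp <;> omega) hstep))
    · exact mono4 _ (cov3 t (by rw [ht]; ext <;> simp <;> omega) hstep)
    · exact cov4 t (by rw [ht]; ext <;> simp <;> omega) hstep
  refine ⟨m4.qreach, m4.grow, m4.sub, m4.stm, ?_, m4.sK, m4.sW⟩
  intro p hp hp0 hpq t hstep
  by_cases hpxy : p = (x, y)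
  · subst hpxy; exact hcovAll t hstep
  · exact m4.cls' p hp hp0 hpq hpxy t hstep

lemma AInv_pop (r c : Int) (grid : List String) (V0 : List (List Bool)) (st : Int × Int)
    (x y : Int) (rest : List (Int × Int)) (V : List (List Bool)) (s w : Int)
    (inv : AInv r c grid V0 st ((x, y) :: rest) V s w) :
    AMid r c grid V0 st x y (if cellAt grid x y = 'k' then s + 1 else s)
      (if cellAt grid x y = 'k' then w else if cellAt grid x y = 'v' then w + 1 else w) rest V := by
  refine ⟨fun p hp => inv.qreach p (List.mem_cons_of_mem _ hp), inv.grow, inv.sub, inv.stm,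
    ?_, ?_, ?_⟩
  · intro p hp hp0 hpq hpxy t hstep
    exact inv.cls p hp hp0 (by simp [hpxy, hpq]) t hstep
  · have hm := inv.sK
    simp only [List.countP_cons] at hm
    by_cases hk : cellAt grid x y = 'k' <;> simp only [hk, if_pos, if_neg] <;>
      simp [hk] at hm ⊢ <;> push_cast at hm ⊢ <;> omega
  · have hm := inv.sW
    simp only [List.countP_cons] at hm
    by_cases hk : cellAt grid x y = 'k'
    · simp only [hk] at hm ⊢
      simp at hm ⊢
      push_cast at hm ⊢
      omega
    · by_cases hv : cellAt grid x y = 'v' <;> simp only [if_neg hk] <;>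
        simp [hk, hv] at hm ⊢ <;> push_cast at hm ⊢ <;> omega

def APost (r c : Int) (grid : List String) (V0 : List (List Bool)) (st : Int × Int)
    (res : (Int × Int) × List (List Bool)) : Prop :=
  (∀ p, markedA r c res.2 p ↔ (markedA r c V0 p ∨ Reach r c grid st p)) ∧
  res.1.1 + (cntA r c grid 'k' V0 : Int) = (cntA r c grid 'k' res.2 : Int) ∧
  res.1.2 + (cntA r c grid 'v' V0 : Int) = (cntA r c grid 'v' res.2 : Int) ∧
  (∀ p t, markedA r c res.2 p → stepC r c grid p t → markedA r c res.2 t)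

lemma bfsLoopF_nil (r c : Int) (grid : List String) (n : Nat) (V : List (List Bool))
    (s w : Int) : bfsLoopF r c grid n [] V s w = ((s, w), V) := by
  cases n <;> rfl

lemma bfsLoop_nil_post (r c : Int) (grid : List String) (V0 : List (List Bool)) (st : Int × Int)
    (hcl0 : ∀ p t, markedA r c V0 p → stepC r c grid p t → markedA r c V0 t)
    (n : Nat) (V : List (List Bool)) (s w : Int) (inv : AInv r c grid V0 st [] V s w) :
    APost r c grid V0 st (bfsLoopF r c grid n [] V s w) := by
  rw [bfsLoopF_nil]
  refine ⟨?_, ?_, ?_, ?_⟩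
  · intro p
    constructor
    · exact inv.sub p
    · rintro (hp | hp)
      · exact inv.grow p hp
      · induction hp with
        | refl => exact inv.stm
        | tail h1 h2 ih =>
          rename_i b _
          by_cases hb0 : markedA r c V0 b
          · exact inv.grow _ (hcl0 _ _ hb0 h2)
          · exact inv.cls b ih hb0 (by simp) _ h2
  · have := inv.sK; simpa using this
  · have := inv.sW; simpa using this
  · intro p t hp hstep
    by_cases hb0 : markedA r c V0 p
    · exact inv.grow _ (hcl0 _ _ hb0 hstep)
    · exact inv.cls p hp hb0 (by simp) _ hstep

lemma bfsLoopF_spec (r c : Int) (grid : List String) (V0 : List (List Bool)) (st : Int × Int)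
    (hst : openCell r c grid st)
    (hcl0 : ∀ p t, markedA r c V0 p → stepC r c grid p t → markedA r c V0 t) :
    ∀ (n : Nat) (Q : List (Int × Int)) (V : List (List Bool)) (s w : Int),
      unvis V + Q.length ≤ n → AInv r c grid V0 st Q V s w →
      APost r c grid V0 st (bfsLoopF r c grid n Q V s w) := by
  intro n
  induction n with
  | zero =>
    intro Q V s w hn inv
    cases Q with
    | nil => exact bfsLoop_nil_post r c grid V0 st hcl0 0 V s w inv
    | cons hd tl => simp at hn
  | succ n ih =>
    intro Q V s w hn inv
    cases Q with
    | nil => exact bfsLoop_nil_post r c grid V0 st hcl0 (n + 1) V s w inv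
    | cons hd tl =>
      obtain ⟨x, y⟩ := hd
      show APost r c grid V0 st (bfsLoopF r c grid n
        (dirsA.foldl (pushA r c grid x y) (tl, V)).1
        (dirsA.foldl (pushA r c grid x y) (tl, V)).2
        (if cellAt grid x y = 'k' then s + 1 else s)
        (if cellAt grid x y = 'k' then w else if cellAt grid x y = 'v' then w + 1 else w))
      have hxy : Reach r c grid st (x, y) := inv.qreach (x, y) List.mem_cons_self
      have hmid := AInv_pop r c grid V0 st x y tl V s w inv
      have hinv' := afterFold r c grid V0 st x y _ _ tl V hst hxy hmid
      have hmeas : unvis (dirsA.foldl (pushA r c grid x y) (tl, V)).2 +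
          (dirsA.foldl (pushA r c grid x y) (tl, V)).1.length = unvis V + tl.length :=
        foldA_measure r c grid x y dirsA (tl, V)
      apply ih
      · simp only [List.length_cons] at hn
        omega
      · exact hinv'

lemma bfsLoop_spec (r c : Int) (grid : List String) (V0 : List (List Bool)) (st : Int × Int)
    (hst : openCell r c grid st)
    (hcl0 : ∀ p t, markedA r c V0 p → stepC r c grid p t → markedA r c V0 t)
    (Q : List (Int × Int)) (V : List (List Bool)) (s w : Int)
    (inv : AInv r c grid V0 st Q V s w) :
    APost r c grid V0 st (bfsLoop r c grid Q V s w) :=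
  bfsLoopF_spec r c grid V0 st hst hcl0 (unvis V + Q.length) Q V s w (le_refl _) inv

lemma AInv_init (r c : Int) (grid : List String) (V : List (List Bool)) (st : Int × Int)
    (hinb : inb r c st) (hf : vGet V st.1 st.2 = false) :
    AInv r c grid V st [st] (vSet V st.1 st.2) 0 0 := by
  have hchar := markedA_vSet r c V st.1 st.2 hinb hf
  refine ⟨?_, ?_, ?_, ?_, ?_, ?_, ?_⟩
  · intro p hp
    rw [List.mem_singleton] at hp
    subst hp
    exact Relation.ReflTransGen.refl
  · intro p hp; exact (hchar p).mpr (Or.inr hp)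
  · intro p hp
    rcases (hchar p).mp hp with rfl | hp
    · exact Or.inr Relation.ReflTransGen.refl
    · exact Or.inl hp
  · exact (hchar st).mpr (Or.inl rfl)
  · intro p hp hp0 hpq t hstep
    rcases (hchar p).mp hp with rfl | hp
    · exact absurd (List.mem_singleton.mpr rfl) hpq
    · exact absurd hp hp0
  · have hc := cntA_vSet r c grid 'k' V st.1 st.2 hinb hf
    simp only [List.countP_cons, List.countP_nil] at *
    cases hk : (cellAt grid st.1 st.2 == 'k') <;> simp only [hk] at hc ⊢ <;> simp at hc ⊢ <;>
      push_cast [hc] <;> omega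
  · have hc := cntA_vSet r c grid 'v' V st.1 st.2 hinb hf
    simp only [List.countP_cons, List.countP_nil] at *
    cases hk : (cellAt grid st.1 st.2 == 'v') <;> simp only [hk] at hc ⊢ <;> simp at hc ⊢ <;>
      push_cast [hc] <;> omega

def V0init (r c : Int) : List (List Bool) :=
  (PySem.List.pyRange 0 r 1).map (fun _ => PySem.List.pyRepeat [false] c)

def gA (r c : Int) (grid : List String) (acc2 : List (List Bool) × Int × Int) (p : Int × Int) :
    List (List Bool) × Int × Int :=
  if cellAt grid p.1 p.2 ≠ '#' ∧ vGet acc2.1 p.1 p.2 = false then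
    let res := bfs r c p.1 p.2 grid acc2.1
    (res.2, acc2.2.1 + res.1.1, acc2.2.2 + res.1.2)
  else acc2

lemma foldl_flatMap2 {α β γ : Type} (xs : List α) (f : α → List β) (g : γ → β → γ) (init : γ) :
    (xs.flatMap f).foldl g init = xs.foldl (fun a x => (f x).foldl g a) init := by
  induction xs generalizing init with
  | nil => rfl
  | cons x xs ih => simp [List.flatMap_cons, List.foldl_append, ih]

lemma nested_foldl_eq {γ : Type} (r c : Int) (g : γ → (Int × Int) → γ) (init : γ) :
    (PySem.List.pyRange 0 r 1).foldl
      (fun acc i => (PySem.List.pyRange 0 c 1).foldl (fun acc2 j => g acc2 (i, j)) acc) init =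
      (allCells r c).foldl g init := by
  rw [allCells, foldl_flatMap2]
  congr 1
  funext a i
  rw [List.foldl_map]

lemma solve_eq (r c : Int) (grid : List String) :
    solve r c grid =
      PySem.Int.toStr ((allCells r c).foldl (gA r c grid) (V0init r c, 0, 0)).2.1 ++ " " ++
      PySem.Int.toStr ((allCells r c).foldl (gA r c grid) (V0init r c, 0, 0)).2.2 := by
  rw [← nested_foldl_eq r c (gA r c grid) (V0init r c, 0, 0)]
  rfl

lemma vGet_V0init (r c : Int) (p : Int × Int) (h : inb r c p) :
    vGet (V0init r c) p.1 p.2 = false := by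
  obtain ⟨h1, h2, h3, h4⟩ := h
  rw [vGet_nonneg_eq _ _ _ h1 h3]
  have hlen : p.1.toNat < (V0init r c).length := by
    simp only [V0init, List.length_map, PySem.List.length_pyRange_one]
    omega
  rw [getD_dichotomy (V0init r c) p.1.toNat [], dif_pos hlen]
  have hrow : (V0init r c)[p.1.toNat] = PySem.List.pyRepeat [false] c := by
    simp [V0init]
  rw [hrow, PySem.List.pyRepeat_singleton]
  rw [getD_dichotomy, dif_pos (by simp only [List.length_replicate]; omega),
    List.getElem_replicate]

-- ===================== B-side theory: labels as functions on the open cells =====================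

def idOf (c : Int) (p : Int × Int) : Int := p.1 * c + p.2

def openCells (r c : Int) (grid : List String) : List (Int × Int) :=
  (allCells r c).filter (fun p => decide (cellAt grid p.1 p.2 ≠ '#'))

lemma mem_openCells (r c : Int) (grid : List String) (p : Int × Int) :
    p ∈ openCells r c grid ↔ openCell r c grid p := by
  simp only [openCells, List.mem_filter, mem_allCells, decide_eq_true_eq, openCell, inb]

lemma nodup_openCells (r c : Int) (grid : List String) : (openCells r c grid).Nodup :=
  (nodup_allCells r c).filter _

def graphL (r c : Int) (grid : List String) (g : (Int × Int) → Int) : PySem.Dict (Int × Int) Int :=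
  PySem.Dict.mk ((openCells r c grid).map (fun p => (p, g p)))

lemma items_graphL (r c : Int) (grid : List String) (g : (Int × Int) → Int) :
    (graphL r c grid g).items = (openCells r c grid).map (fun p => (p, g p)) := rfl

lemma keys_graphL (r c : Int) (grid : List String) (g : (Int × Int) → Int) :
    (graphL r c grid g).keys = openCells r c grid := by
  show ((openCells r c grid).map (fun p => (p, g p))).map Prod.fst = _
  rw [List.map_map]
  show (openCells r c grid).map (fun p => p) = openCells r c grid
  simp

lemma values_graphL (r c : Int) (grid : List String) (g : (Int × Int) → Int) :
    (graphL r c grid g).values = (openCells r c grid).map g := by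
  show ((openCells r c grid).map (fun p => (p, g p))).map Prod.snd = _
  rw [List.map_map]
  rfl

lemma get?_graphL (r c : Int) (grid : List String) (g : (Int × Int) → Int) (q : Int × Int) :
    (graphL r c grid g).get? q = if q ∈ openCells r c grid then some (g q) else none := by
  have hnd : (graphL r c grid g).keys.Nodup := by
    rw [keys_graphL]; exact nodup_openCells r c grid
  split
  · rename_i hq
    exact (PySem.Dict.get?_eq_some_iff_mem_items _ _ _ hnd).mpr
      (by rw [items_graphL]; exact List.mem_map.mpr ⟨q, hq, rfl⟩)
  · rename_i hq
    exact (PySem.Dict.get?_eq_none_iff_not_mem_keys _ _).mpr (by rwa [keys_graphL])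

lemma graphL_congr (r c : Int) (grid : List String) (f g : (Int × Int) → Int)
    (h : ∀ p ∈ openCells r c grid, f p = g p) : graphL r c grid f = graphL r c grid g := by
  apply PySem.Dict.ext
  rw [items_graphL, items_graphL]
  exact List.map_inj_left.mpr (fun p hp => by rw [h p hp])

lemma graphL_inj (r c : Int) (grid : List String) (f g : (Int × Int) → Int)
    (h : graphL r c grid f = graphL r c grid g) : ∀ p ∈ openCells r c grid, f p = g p := by
  intro p hp
  have := congrArg PySem.Dict.items h
  rw [items_graphL, items_graphL] at this
  have := List.map_inj_left.mp this p hp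
  exact congrArg Prod.snd this

lemma initLabels_eq (r c : Int) (grid : List String) :
    initLabels r c grid = graphL r c grid (fun p => idOf c p) := by
  unfold initLabels
  rw [nested_foldl_eq r c
    (fun d p => if cellAt grid p.1 p.2 ≠ '#' then d.insert p (p.1 * c + p.2) else d)
    PySem.Dict.empty]
  rw [PySem.List.foldl_ite_eq_foldl_filter (fun p : Int × Int => cellAt grid p.1 p.2 ≠ '#')
    (fun d p => d.insert p (p.1 * c + p.2)) (allCells r c) PySem.Dict.empty]
  apply PySem.Dict.ext
  have hfresh := PySem.Dict.items_foldl_insert_fresh (openCells r c grid)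
    (fun a : Int × Int => a) (fun p : Int × Int => p.1 * c + p.2) PySem.Dict.empty
    (fun a _ => by simp [PySem.Dict.contains_empty])
    (by simpa using nodup_openCells r c grid)
  rw [items_graphL]
  exact hfresh

lemma passLabels_graphL (r c : Int) (grid : List String) (g : (Int × Int) → Int) :
    passLabels (graphL r c grid g) =
      graphL r c grid (fun p => minNbr (graphL r c grid g) p.1 p.2 (g p)) := by
  unfold passLabels
  rw [items_graphL, List.foldl_map]
  apply PySem.Dict.ext
  have hfresh := PySem.Dict.items_foldl_insert_fresh (openCells r c grid)
    (fun a : Int × Int => a)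
    (fun p : Int × Int => minNbr (graphL r c grid g) p.1 p.2 (g p)) PySem.Dict.empty
    (fun a _ => by simp [PySem.Dict.contains_empty])
    (by simpa using nodup_openCells r c grid)
  rw [items_graphL]
  exact hfresh

def nbrFold (r c : Int) (grid : List String) (g : (Int × Int) → Int)
    (l : List (Int × Int)) (init : Int) : Int :=
  l.foldl (fun m nb => if nb ∈ openCells r c grid ∧ g nb < m then g nb else m) init

def stepL (r c : Int) (grid : List String) (g : (Int × Int) → Int) (p : Int × Int) : Int :=
  nbrFold r c grid g (neighborsB p.1 p.2) (g p)

lemma minNbr_eq_stepL (r c : Int) (grid : List String) (g : (Int × Int) → Int) (p : Int × Int) :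
    minNbr (graphL r c grid g) p.1 p.2 (g p) = stepL r c grid g p := by
  unfold minNbr stepL nbrFold
  apply PySem.List.foldl_congr_mem
  intro m nb _
  rw [get?_graphL]
  by_cases h : nb ∈ openCells r c grid
  · rw [if_pos h]
    show (if g nb < m then g nb else m) = _
    by_cases h2 : g nb < m
    · rw [if_pos h2, if_pos ⟨h, h2⟩]
    · rw [if_neg h2, if_neg (by tauto)]
  · rw [if_neg h]
    show m = _
    rw [if_neg (by tauto)]

lemma nbrFold_spec (r c : Int) (grid : List String) (g : (Int × Int) → Int)
    (l : List (Int × Int)) : ∀ init : Int,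
    nbrFold r c grid g l init ≤ init ∧
    (∀ x ∈ l, x ∈ openCells r c grid → nbrFold r c grid g l init ≤ g x) ∧
    (nbrFold r c grid g l init = init ∨
      ∃ x ∈ l, x ∈ openCells r c grid ∧ nbrFold r c grid g l init = g x) := by
  induction l with
  | nil => intro init; exact ⟨le_refl _, by simp, Or.inl rfl⟩
  | cons x l ih =>
    intro init
    have hfold : ∀ i, nbrFold r c grid g (x :: l) i =
        nbrFold r c grid g l (if x ∈ openCells r c grid ∧ g x < i then g x else i) :=
      fun i => rfl
    obtain ⟨h1, h2, h3⟩ := ih (if x ∈ openCells r c grid ∧ g x < init then g x else init)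
    have hinit : (if x ∈ openCells r c grid ∧ g x < init then g x else init) ≤ init := by
      split
      · rename_i h; exact le_of_lt h.2
      · exact le_refl _
    rw [hfold]
    refine ⟨le_trans h1 hinit, ?_, ?_⟩
    · intro y hy hyo
      rcases List.mem_cons.mp hy with rfl | hyl
      · refine le_trans h1 ?_
        by_cases hlt : g y < init
        · rw [if_pos ⟨hyo, hlt⟩]
        · rw [if_neg (by tauto)]; omega
      · exact h2 y hyl hyo
    · by_cases hc : x ∈ openCells r c grid ∧ g x < init
      · rw [if_pos hc] at h3 ⊢
        rcases h3 with he | ⟨y, hyl, hyo, he⟩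
        · exact Or.inr ⟨x, List.mem_cons_self, hc.1, he⟩
        · exact Or.inr ⟨y, List.mem_cons_of_mem _ hyl, hyo, he⟩
      · rw [if_neg hc] at h3 ⊢
        rcases h3 with he | ⟨y, hyl, hyo, he⟩
        · exact Or.inl he
        · exact Or.inr ⟨y, List.mem_cons_of_mem _ hyl, hyo, he⟩

lemma stepL_le (r c : Int) (grid : List String) (g : (Int × Int) → Int) (p : Int × Int) :
    stepL r c grid g p ≤ g p :=
  (nbrFold_spec r c grid g (neighborsB p.1 p.2) (g p)).1

lemma stepL_le_nbr (r c : Int) (grid : List String) (g : (Int × Int) → Int) (p q : Int × Int)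
    (hq : q ∈ neighborsB p.1 p.2) (hqo : q ∈ openCells r c grid) :
    stepL r c grid g p ≤ g q :=
  (nbrFold_spec r c grid g (neighborsB p.1 p.2) (g p)).2.1 q hq hqo

lemma stepL_attain (r c : Int) (grid : List String) (g : (Int × Int) → Int) (p : Int × Int) :
    stepL r c grid g p = g p ∨
      ∃ q ∈ neighborsB p.1 p.2, q ∈ openCells r c grid ∧ stepL r c grid g p = g q :=
  (nbrFold_spec r c grid g (neighborsB p.1 p.2) (g p)).2.2

lemma mem_neighborsB (p q : Int × Int) : q ∈ neighborsB p.1 p.2 ↔ adjC p q := by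
  simp [neighborsB, adjC]

def LabInv (r c : Int) (grid : List String) (g : (Int × Int) → Int) : Prop :=
  ∀ p ∈ openCells r c grid,
    (∃ m, Reach r c grid p m ∧ g p = idOf c m) ∧ g p ≤ idOf c p

def stableL (r c : Int) (grid : List String) (g : (Int × Int) → Int) : Prop :=
  ∀ p ∈ openCells r c grid, stepL r c grid g p = g p

lemma stepL_inv (r c : Int) (grid : List String) (g : (Int × Int) → Int)
    (hinv : LabInv r c grid g) : LabInv r c grid (stepL r c grid g) := by
  intro p hp
  constructor
  · rcases stepL_attain r c grid g p with he | ⟨q, hqn, hqo, he⟩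
    · obtain ⟨m, hr, hm⟩ := (hinv p hp).1
      exact ⟨m, hr, by rw [he, hm]⟩
    · obtain ⟨m, hr, hm⟩ := (hinv q hqo).1
      have hstep : stepC r c grid p q :=
        ⟨(mem_openCells r c grid p).mp hp, (mem_openCells r c grid q).mp hqo,
          (mem_neighborsB p q).mp hqn⟩
      exact ⟨m, Relation.ReflTransGen.head hstep hr, by rw [he, hm]⟩
  · exact le_trans (stepL_le r c grid g p) (hinv p hp).2

lemma idOf_nonneg (r c : Int) (p : Int × Int) (h : inb r c p) : 0 ≤ idOf c p := by
  obtain ⟨h1, _, h3, h4⟩ := h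
  have := mul_nonneg h1 (by omega : (0 : Int) ≤ c)
  unfold idOf
  linarith

lemma lab_nonneg (r c : Int) (grid : List String) (g : (Int × Int) → Int)
    (hinv : LabInv r c grid g) (p : Int × Int) (hp : p ∈ openCells r c grid) : 0 ≤ g p := by
  obtain ⟨m, hr, hm⟩ := (hinv p hp).1
  have hopen := reach_open r c grid p m ((mem_openCells r c grid p).mp hp) hr
  rw [hm]
  exact idOf_nonneg r c m hopen.1

lemma idOf_inj (r c : Int) (p q : Int × Int) (hp : inb r c p) (hq : inb r c q)
    (h : idOf c p = idOf c q) : p = q := by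
  obtain ⟨hp1, hp2, hp3, hp4⟩ := hp
  obtain ⟨hq1, hq2, hq3, hq4⟩ := hq
  unfold idOf at h
  have h1 : p.1 = q.1 := by
    rcases lt_trichotomy p.1 q.1 with hlt | he | hgt
    · have h2 : (p.1 + 1) * c ≤ q.1 * c :=
        mul_le_mul_of_nonneg_right (by omega) (by omega)
      rw [add_mul, one_mul] at h2
      linarith
    · exact he
    · have h2 : (q.1 + 1) * c ≤ p.1 * c :=
        mul_le_mul_of_nonneg_right (by omega) (by omega)
      rw [add_mul, one_mul] at h2
      linarith
  have h2 : p.2 = q.2 := by rw [h1] at h; linarith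
  exact Prod.ext h1 h2

lemma pairwise_idOf_allCells (r c : Int) :
    (allCells r c).Pairwise (fun p q => idOf c p < idOf c q) := by
  unfold allCells
  rw [List.pairwise_flatMap]
  constructor
  · intro i _
    rw [List.pairwise_map]
    refine (PySem.List.pairwise_lt_pyRange_one 0 c).imp ?_
    intro j j' hj
    simpa [idOf] using hj
  · refine (PySem.List.pairwise_lt_pyRange_one 0 r).imp ?_
    intro i1 i2 hi x hx y hy
    obtain ⟨j1, hj1, rfl⟩ := List.mem_map.mp hx
    obtain ⟨j2, hj2, rfl⟩ := List.mem_map.mp hy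
    rw [PySem.List.mem_pyRange_one] at hj1 hj2
    have h2 : (i1 + 1) * c ≤ i2 * c :=
      mul_le_mul_of_nonneg_right (by omega) (by omega)
    rw [add_mul, one_mul] at h2
    simp only [idOf]
    linarith

lemma pairwise_idOf_openCells (r c : Int) (grid : List String) :
    (openCells r c grid).Pairwise (fun p q => idOf c p < idOf c q) :=
  (pairwise_idOf_allCells r c).sublist List.filter_sublist

lemma mem_prefix_of_idOf_lt (c : Int) (l P S : List (Int × Int)) (p m : Int × Int)
    (hpw : l.Pairwise (fun a b => idOf c a < idOf c b)) (h : l = P ++ p :: S)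
    (hm : m ∈ l) (hlt : idOf c m < idOf c p) : m ∈ P := by
  subst h
  rcases List.mem_append.mp hm with hP | hS
  · exact hP
  · rcases List.mem_cons.mp hS with rfl | hS'
    · omega
    · have := ((List.pairwise_append.mp hpw).2.1)
      rw [List.pairwise_cons] at this
      have := this.1 m hS'
      omega

lemma idOf_lt_of_mem_prefix (c : Int) (l P S : List (Int × Int)) (p m : Int × Int)
    (hpw : l.Pairwise (fun a b => idOf c a < idOf c b)) (h : l = P ++ p :: S)
    (hm : m ∈ P) : idOf c m < idOf c p := by
  subst h
  exact (List.pairwise_append.mp hpw).2.2 m hm p List.mem_cons_self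

lemma stepC_symm (r c : Int) (grid : List String) (p q : Int × Int)
    (h : stepC r c grid p q) : stepC r c grid q p := by
  obtain ⟨h1, h2, h3⟩ := h
  refine ⟨h2, h1, ?_⟩
  unfold adjC at h3 ⊢
  rcases h3 with h | h | h | h <;> subst h <;> simp <;> omega

lemma reach_symm (r c : Int) (grid : List String) (p q : Int × Int)
    (h : Reach r c grid p q) : Reach r c grid q p :=
  Relation.ReflTransGen.symmetric (fun _ _ hs => stepC_symm r c grid _ _ hs) h

lemma label_le_of_step (r c : Int) (grid : List String) (g : (Int × Int) → Int)
    (hst : stableL r c grid g) (p q : Int × Int) (h : stepC r c grid p q) : g p ≤ g q := by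
  have hp : p ∈ openCells r c grid := (mem_openCells r c grid p).mpr h.1
  have hq : q ∈ openCells r c grid := (mem_openCells r c grid q).mpr h.2.1
  calc g p = stepL r c grid g p := (hst p hp).symm
    _ ≤ g q := stepL_le_nbr r c grid g p q ((mem_neighborsB p q).mpr h.2.2) hq

lemma label_const_of_reach (r c : Int) (grid : List String) (g : (Int × Int) → Int)
    (hst : stableL r c grid g) (p q : Int × Int) (h : Reach r c grid p q) : g p = g q := by
  induction h with
  | refl => rfl
  | tail _ hbq ih =>
    rename_i b q' _
    exact ih.trans (le_antisymm (label_le_of_step r c grid g hst b q' hbq)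
      (label_le_of_step r c grid g hst q' b (stepC_symm r c grid b q' hbq)))

lemma label_eq_iff_reach (r c : Int) (grid : List String) (g : (Int × Int) → Int)
    (hst : stableL r c grid g) (hinv : LabInv r c grid g) (p q : Int × Int)
    (hp : p ∈ openCells r c grid) (hq : q ∈ openCells r c grid) :
    g p = g q ↔ Reach r c grid p q := by
  constructor
  · intro h
    obtain ⟨m1, hr1, hm1⟩ := (hinv p hp).1
    obtain ⟨m2, hr2, hm2⟩ := (hinv q hq).1
    have ho1 := reach_open r c grid p m1 ((mem_openCells r c grid p).mp hp) hr1
    have ho2 := reach_open r c grid q m2 ((mem_openCells r c grid q).mp hq) hr2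
    have : m1 = m2 := idOf_inj r c m1 m2 ho1.1 ho2.1 (by omega)
    subst this
    exact Relation.ReflTransGen.trans hr1 (reach_symm r c grid q m1 hr2)
  · exact label_const_of_reach r c grid g hst p q

lemma reach_iff_label (r c : Int) (grid : List String) (g : (Int × Int) → Int)
    (hst : stableL r c grid g) (hinv : LabInv r c grid g) (p q : Int × Int)
    (hp : openCell r c grid p) :
    Reach r c grid p q ↔ (openCell r c grid q ∧ g q = g p) := by
  constructor
  · intro h
    exact ⟨reach_open r c grid p q hp h, (label_const_of_reach r c grid g hst p q h).symm⟩
  · rintro ⟨hoq, he⟩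
    exact (label_eq_iff_reach r c grid g hst hinv p q ((mem_openCells r c grid p).mpr hp)
      ((mem_openCells r c grid q).mpr hoq)).mp he.symm

lemma nonrep_witness (r c : Int) (grid : List String) (g : (Int × Int) → Int)
    (hinv : LabInv r c grid g) (p : Int × Int) (hp : p ∈ openCells r c grid)
    (hne : g p ≠ idOf c p) :
    ∃ m ∈ openCells r c grid, Reach r c grid p m ∧ idOf c m = g p ∧ idOf c m < idOf c p := by
  obtain ⟨m, hr, hm⟩ := (hinv p hp).1
  have hb := (hinv p hp).2
  have hopen := reach_open r c grid p m ((mem_openCells r c grid p).mp hp) hr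
  exact ⟨m, (mem_openCells r c grid m).mpr hopen, hr, hm.symm, by omega⟩

lemma markedA_reach (r c : Int) (grid : List String) (V : List (List Bool))
    (hcls : ∀ q t, markedA r c V q → stepC r c grid q t → markedA r c V t)
    (q p : Int × Int) (hq : markedA r c V q) (h : Reach r c grid q p) : markedA r c V p := by
  induction h with
  | refl => exact hq
  | tail _ hbp ih => exact hcls _ _ ih hbp

-- ---------- fixpoint loop ----------

lemma labelSum_graphL (r c : Int) (grid : List String) (g : (Int × Int) → Int) :
    labelSum (graphL r c grid g) = ((openCells r c grid).map (fun p => (g p).toNat)).sum := by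
  unfold labelSum
  rw [items_graphL, List.map_map]
  rfl

lemma pass_decrease (r c : Int) (grid : List String) (g : (Int × Int) → Int)
    (hinv : LabInv r c grid g)
    (hne : graphL r c grid (stepL r c grid g) ≠ graphL r c grid g) :
    labelSum (graphL r c grid (stepL r c grid g)) < labelSum (graphL r c grid g) := by
  rw [labelSum_graphL, labelSum_graphL]
  have hdiff : ∃ p ∈ openCells r c grid, stepL r c grid g p ≠ g p := by
    by_contra hc
    push_neg at hc
    exact hne (graphL_congr r c grid _ _ hc)
  obtain ⟨p, hp, hpne⟩ := hdiff
  apply List.sum_lt_sum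
  · intro q _
    have := stepL_le r c grid g q
    omega
  · refine ⟨p, hp, ?_⟩
    have h1 := stepL_le r c grid g p
    have h2 := lab_nonneg r c grid (stepL r c grid g) (stepL_inv r c grid g hinv) p hp
    omega

lemma labLoopF_succ (fuel : Nat) (d : PySem.Dict (Int × Int) Int) :
    labLoopF (fuel + 1) d = if passLabels d = d then d else labLoopF fuel (passLabels d) := rfl

lemma labLoopF_spec (r c : Int) (grid : List String) :
    ∀ (fuel : Nat) (g : (Int × Int) → Int), LabInv r c grid g →
      labelSum (graphL r c grid g) < fuel →
      ∃ g', labLoopF fuel (graphL r c grid g) = graphL r c grid g' ∧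
        LabInv r c grid g' ∧ stableL r c grid g' := by
  intro fuel
  induction fuel with
  | zero => intro g _ hlt; omega
  | succ fuel ih =>
    intro g hinv hlt
    have hpass : passLabels (graphL r c grid g) = graphL r c grid (stepL r c grid g) := by
      rw [passLabels_graphL]
      exact graphL_congr r c grid _ _ (fun p _ => minNbr_eq_stepL r c grid g p)
    rw [labLoopF_succ]
    by_cases hfix : passLabels (graphL r c grid g) = graphL r c grid g
    · rw [if_pos hfix]
      exact ⟨g, rfl, hinv, fun p hp => graphL_inj r c grid _ _ (hpass ▸ hfix) p hp⟩
    · rw [if_neg hfix, hpass]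
      have hne : graphL r c grid (stepL r c grid g) ≠ graphL r c grid g := hpass ▸ hfix
      have hdec := pass_decrease r c grid g hinv hne
      exact ih (stepL r c grid g) (stepL_inv r c grid g hinv) (by omega)

lemma labFix_spec (r c : Int) (grid : List String) :
    ∃ g, labFix (initLabels r c grid) = graphL r c grid g ∧
      LabInv r c grid g ∧ stableL r c grid g := by
  have hinv0 : LabInv r c grid (fun p => idOf c p) := by
    intro p _
    exact ⟨⟨p, Relation.ReflTransGen.refl, rfl⟩, le_refl _⟩
  rw [initLabels_eq]
  exact labLoopF_spec r c grid (labelSum (graphL r c grid (fun p => idOf c p)) + 1)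
    (fun p => idOf c p) hinv0 (by omega)

-- ---------- counting helpers ----------

lemma countP_split {α : Type} (l : List α) (f g h : α → Bool)
    (h1 : ∀ x ∈ l, f x = (g x || h x)) (h2 : ∀ x ∈ l, (g x && h x) = false) :
    l.countP f = l.countP g + l.countP h := by
  induction l with
  | nil => rfl
  | cons x l ih =>
    have hx1 := h1 x List.mem_cons_self
    have hx2 := h2 x List.mem_cons_self
    have hih := ih (fun y hy => h1 y (List.mem_cons_of_mem _ hy))
      (fun y hy => h2 y (List.mem_cons_of_mem _ hy))
    simp only [List.countP_cons, hih]
    cases hg : g x <;> cases hh : h x <;> simp [hg, hh] at hx1 hx2 ⊢ <;>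
      simp [hx1] <;> omega

lemma vGet_true_iff_marked (r c : Int) (V : List (List Bool)) (q : Int × Int)
    (hinb : inb r c q) : vGet V q.1 q.2 = true ↔ markedA r c V q :=
  ⟨fun h => ⟨hinb, h⟩, fun h => h.2⟩

-- per-component counts, phrased the way Source B's tallies come out
def cCnt (r c : Int) (grid : List String) (g : (Int × Int) → Int) (ch : Char) (v : Int) : Int :=
  (((openCells r c grid).countP
    (fun q => (g q == v) && decide (cellAt grid q.1 q.2 = ch)) : Nat) : Int)

def tallyF (r c : Int) (grid : List String) (g : (Int × Int) → Int)
    (a : Int × Int) (p : Int × Int) : Int × Int :=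
  if cCnt r c grid g 'k' (g p) > cCnt r c grid g 'v' (g p) then
    (a.1 + cCnt r c grid g 'k' (g p), a.2)
  else (a.1, a.2 + cCnt r c grid g 'v' (g p))

def tally (r c : Int) (grid : List String) (g : (Int × Int) → Int)
    (P : List (Int × Int)) : Int × Int :=
  (P.filter (fun p => (g p == idOf c p) && decide (cellAt grid p.1 p.2 ≠ '#'))).foldl
    (tallyF r c grid g) (0, 0)

-- after a BFS from a fresh open cell p, the k-count grows by exactly the component count of p
lemma cnt_after_bfs (r c : Int) (grid : List String) (g : (Int × Int) → Int)
    (hst : stableL r c grid g) (hinv : LabInv r c grid g)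
    (V V' : List (List Bool)) (p : Int × Int) (ch : Char)
    (hop : openCell r c grid p)
    (hunm : ¬ markedA r c V p)
    (hcls : ∀ q t, markedA r c V q → stepC r c grid q t → markedA r c V t)
    (hiff : ∀ q, markedA r c V' q ↔ (markedA r c V q ∨ Reach r c grid p q)) :
    (cntA r c grid ch V' : Int) = (cntA r c grid ch V : Int) + cCnt r c grid g ch (g p) := by
  unfold cntA cCnt
  have hsplit := countP_split (allCells r c)
    (fun q => vGet V' q.1 q.2 && (cellAt grid q.1 q.2 == ch))
    (fun q => vGet V q.1 q.2 && (cellAt grid q.1 q.2 == ch))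
    (fun q => ((g q == g p) && decide (cellAt grid q.1 q.2 ≠ '#')) &&
      (cellAt grid q.1 q.2 == ch))
    ?_ ?_
  · rw [hsplit]
    have hcc : (openCells r c grid).countP
        (fun q => (g q == g p) && decide (cellAt grid q.1 q.2 = ch)) =
        (allCells r c).countP
          (fun q => ((g q == g p) && decide (cellAt grid q.1 q.2 ≠ '#')) &&
            (cellAt grid q.1 q.2 == ch)) := by
      unfold openCells
      rw [List.countP_filter]
      apply List.countP_congr
      intro q _
      cases (g q == g p) <;> cases hd : decide (cellAt grid q.1 q.2 = ch) <;>
        cases he : decide (cellAt grid q.1 q.2 ≠ '#') <;> simp_all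
    rw [hcc]
    push_cast
    ring
  · -- pointwise: marked V' = marked V or same-label open cell
    intro q hq
    show (vGet V' q.1 q.2 && (cellAt grid q.1 q.2 == ch)) =
      ((vGet V q.1 q.2 && (cellAt grid q.1 q.2 == ch)) ||
        (((g q == g p) && decide (cellAt grid q.1 q.2 ≠ '#')) && (cellAt grid q.1 q.2 == ch)))
    have hinb : inb r c q := (mem_allCells r c q).mp hq
    have hvq : vGet V' q.1 q.2 = (vGet V q.1 q.2 ||
        ((g q == g p) && decide (cellAt grid q.1 q.2 ≠ '#'))) := by
      have hl : vGet V' q.1 q.2 = true ↔ (vGet V q.1 q.2 = true ∨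
          ((g q == g p) && decide (cellAt grid q.1 q.2 ≠ '#')) = true) := by
        rw [vGet_true_iff_marked r c V' q hinb, hiff q,
          vGet_true_iff_marked r c V q hinb]
        constructor
        · rintro (h | h)
          · exact Or.inl h
          · right
            have := (reach_iff_label r c grid g hst hinv p q hop).mp h
            simp [this.2, this.1.2]
        · rintro (h | h)
          · exact Or.inl h
          · right
            simp only [Bool.and_eq_true, beq_iff_eq, decide_eq_true_eq] at h
            exact (reach_iff_label r c grid g hst hinv p q hop).mpr ⟨⟨hinb, h.2⟩, h.1⟩
      cases hb : vGet V' q.1 q.2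
      · cases hc1 : vGet V q.1 q.2
        · cases hc2 : ((g q == g p) && decide (cellAt grid q.1 q.2 ≠ '#'))
          · rfl
          · rw [hb, hc1, hc2] at hl; simp at hl
        · rw [hb, hc1] at hl; simp at hl
      · rw [hb] at hl
        rcases hl.mp rfl with h | h
        · rw [h]; rfl
        · rw [h]; simp
    rw [hvq]
    cases vGet V q.1 q.2 <;> cases ((g q == g p) && decide (cellAt grid q.1 q.2 ≠ '#')) <;>
      cases (cellAt grid q.1 q.2 == ch) <;> rfl
  · -- disjoint: a same-label open cell cannot already be marked (else p would be marked)
    intro q hq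
    show ((vGet V q.1 q.2 && (cellAt grid q.1 q.2 == ch)) &&
        (((g q == g p) && decide (cellAt grid q.1 q.2 ≠ '#')) && (cellAt grid q.1 q.2 == ch))) = false
    have hinb : inb r c q := (mem_allCells r c q).mp hq
    by_contra hc
    have h1 : vGet V q.1 q.2 = true ∧
        (((g q == g p) && decide (cellAt grid q.1 q.2 ≠ '#')) &&
          (cellAt grid q.1 q.2 == ch)) = true := by
      cases hb1 : vGet V q.1 q.2 <;>
        cases hb2 : (((g q == g p) && decide (cellAt grid q.1 q.2 ≠ '#')) &&
          (cellAt grid q.1 q.2 == ch)) <;> simp_all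
    obtain ⟨hb1, hb2⟩ := h1
    simp only [Bool.and_eq_true, beq_iff_eq, decide_eq_true_eq] at hb2
    have hmq : markedA r c V q := ⟨hinb, hb1⟩
    have hreach : Reach r c grid p q :=
      (reach_iff_label r c grid g hst hinv p q hop).mpr ⟨⟨hinb, hb2.1.2⟩, hb2.1.1⟩
    exact hunm (markedA_reach r c grid V hcls q p hmq (reach_symm r c grid p q hreach))

-- ---------- the outer fold of A computes tally ----------

lemma tally_append_rep (r c : Int) (grid : List String) (g : (Int × Int) → Int)
    (P : List (Int × Int)) (p : Int × Int)
    (hrep : ((g p == idOf c p) && decide (cellAt grid p.1 p.2 ≠ '#')) = true) :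
    tally r c grid g (P ++ [p]) = tallyF r c grid g (tally r c grid g P) p := by
  unfold tally
  rw [List.filter_append, List.foldl_append, List.filter_singleton]
  simp only [hrep]
  rfl

lemma tally_append_skip (r c : Int) (grid : List String) (g : (Int × Int) → Int)
    (P : List (Int × Int)) (p : Int × Int)
    (hrep : ((g p == idOf c p) && decide (cellAt grid p.1 p.2 ≠ '#')) = false) :
    tally r c grid g (P ++ [p]) = tally r c grid g P := by
  unfold tally
  rw [List.filter_append, List.filter_singleton]
  simp only [hrep]
  simp

lemma A_fold_spec (r c : Int) (grid : List String) (g : (Int × Int) → Int)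
    (hinv : LabInv r c grid g) (hst : stableL r c grid g) :
    ∀ (S P : List (Int × Int)), allCells r c = P ++ S →
    ∀ (V : List (List Bool)) (ts tw : Int),
      (∀ q, markedA r c V q ↔ ∃ x ∈ P, openCell r c grid x ∧ Reach r c grid x q) →
      (∀ q t, markedA r c V q → stepC r c grid q t → markedA r c V t) →
      (ts, tw) = tally r c grid g P →
      (S.foldl (gA r c grid) (V, ts, tw)).2 = tally r c grid g (P ++ S) := by
  intro S
  induction S with
  | nil =>
    intro P h V ts tw hmark hcls hts
    rw [List.append_nil, List.foldl_nil]
    exact hts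
  | cons p S ih =>
    intro P h V ts tw hmark hcls hts
    have h' : allCells r c = (P ++ [p]) ++ S := by rw [h]; simp
    have hpmem : p ∈ allCells r c := by rw [h]; exact List.mem_append.mpr (Or.inr List.mem_cons_self)
    have hinb : inb r c p := (mem_allCells r c p).mp hpmem
    rw [List.foldl_cons]
    by_cases hopen : cellAt grid p.1 p.2 ≠ '#'
    · have hpo : openCell r c grid p := ⟨hinb, hopen⟩
      have hpoc : p ∈ openCells r c grid := (mem_openCells r c grid p).mpr hpo
      by_cases hrep : g p = idOf c p
      · -- p is the row-major least cell of its component: A starts a BFS here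
        have hunm : ¬ markedA r c V p := by
          intro hm
          obtain ⟨x, hxP, hxo, hxr⟩ := (hmark p).mp hm
          have hxoc : x ∈ openCells r c grid := (mem_openCells r c grid x).mpr hxo
          have he : g x = g p := label_const_of_reach r c grid g hst x p hxr
          have h1 : g x ≤ idOf c x := (hinv x hxoc).2
          have h2 : idOf c x < idOf c p :=
            idOf_lt_of_mem_prefix c (allCells r c) P S p x (pairwise_idOf_allCells r c) h hxP
          omega
        have hguard : vGet V p.1 p.2 = false := by
          cases hb : vGet V p.1 p.2
          · rfl
          · exact absurd ⟨hinb, hb⟩ hunm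
        have hgA : gA r c grid (V, ts, tw) p =
            ((bfsLoop r c grid [(p.1, p.2)] (vSet V p.1 p.2) 0 0).2,
              ts + (bfs r c p.1 p.2 grid V).1.1, tw + (bfs r c p.1 p.2 grid V).1.2) := by
          unfold gA
          rw [if_pos ⟨hopen, hguard⟩]
          rfl
        have hpost := bfsLoop_spec r c grid V p hpo hcls
          [(p.1, p.2)] (vSet V p.1 p.2) 0 0
          (by
            have := AInv_init r c grid V p hinb hguard
            simpa using this)
        obtain ⟨hiff, hk, hv, hcl'⟩ := hpost
        set s := (bfsLoop r c grid [(p.1, p.2)] (vSet V p.1 p.2) 0 0).1.1 with hs_def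
        set w := (bfsLoop r c grid [(p.1, p.2)] (vSet V p.1 p.2) 0 0).1.2 with hw_def
        have hsk : s = cCnt r c grid g 'k' (g p) := by
          have := cnt_after_bfs r c grid g hst hinv V _ p 'k' hpo hunm hcls hiff
          omega
        have hsv : w = cCnt r c grid g 'v' (g p) := by
          have := cnt_after_bfs r c grid g hst hinv V _ p 'v' hpo hunm hcls hiff
          omega
        have hbfs1 : (bfs r c p.1 p.2 grid V).1 = if s > w then (s, 0) else (0, w) := rfl
        have hnew : (gA r c grid (V, ts, tw) p).2 = tallyF r c grid g (ts, tw) p := by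
          rw [hgA]
          unfold tallyF
          rw [← hsk, ← hsv]
          by_cases hcmp : s > w
          · simp [hbfs1, hcmp]
          · simp [hbfs1, hcmp]
        rw [show gA r c grid (V, ts, tw) p =
            ((bfsLoop r c grid [(p.1, p.2)] (vSet V p.1 p.2) 0 0).2,
              tallyF r c grid g (ts, tw) p) from by
          rw [hgA]; rw [show tallyF r c grid g (ts, tw) p = (gA r c grid (V, ts, tw) p).2 from hnew.symm, hgA]]
        rw [show P ++ p :: S = (P ++ [p]) ++ S from by simp]
        apply ih (P ++ [p]) h'
        · intro q
          rw [hiff q]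
          constructor
          · rintro (hm | hr)
            · obtain ⟨x, hxP, hxo, hxr⟩ := (hmark q).mp hm
              exact ⟨x, List.mem_append.mpr (Or.inl hxP), hxo, hxr⟩
            · exact ⟨p, List.mem_append.mpr (Or.inr List.mem_cons_self), hpo, hr⟩
          · rintro ⟨x, hxP, hxo, hxr⟩
            rcases List.mem_append.mp hxP with hxP | hxp
            · exact Or.inl ((hmark q).mpr ⟨x, hxP, hxo, hxr⟩)
            · rw [List.mem_singleton] at hxp
              subst hxp
              exact Or.inr hxr
        · exact hcl'
        · rw [tally_append_rep r c grid g P p (by simp [hrep, hopen]), ← hts]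
          rfl
      · -- p's component was already visited (its least cell precedes p)
        obtain ⟨m, hmo, hmr, hmid, hmlt⟩ := nonrep_witness r c grid g hinv p hpoc hrep
        have hmP : m ∈ P := by
          apply mem_prefix_of_idOf_lt c (allCells r c) P S p m (pairwise_idOf_allCells r c) h
          · exact List.mem_of_mem_filter hmo
          · exact hmlt
        have hmarked : markedA r c V p :=
          (hmark p).mpr ⟨m, hmP, (mem_openCells r c grid m).mp hmo,
            reach_symm r c grid p m hmr⟩
        have hgA : gA r c grid (V, ts, tw) p = (V, ts, tw) := by
          unfold gA
          rw [if_neg]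
          rintro ⟨-, hf⟩
          rw [hmarked.2] at hf
          cases hf
        rw [hgA, show P ++ p :: S = (P ++ [p]) ++ S from by simp]
        apply ih (P ++ [p]) h' V ts tw
        · intro q
          rw [hmark q]
          constructor
          · rintro ⟨x, hxP, hxo, hxr⟩
            exact ⟨x, List.mem_append.mpr (Or.inl hxP), hxo, hxr⟩
          · rintro ⟨x, hxP, hxo, hxr⟩
            rcases List.mem_append.mp hxP with hxP | hxp
            · exact ⟨x, hxP, hxo, hxr⟩
            · rw [List.mem_singleton] at hxp
              exact ⟨m, hmP, (mem_openCells r c grid m).mp hmo,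
                Relation.ReflTransGen.trans (reach_symm r c grid p m hmr) (hxp ▸ hxr)⟩
        · exact hcls
        · rw [tally_append_skip r c grid g P p (by simp [hrep]), ← hts]
    · -- a fence cell: both the guard and the filters skip it
      have hgA : gA r c grid (V, ts, tw) p = (V, ts, tw) := by
        unfold gA
        rw [if_neg (by tauto)]
      rw [hgA, show P ++ p :: S = (P ++ [p]) ++ S from by simp]
      apply ih (P ++ [p]) h' V ts tw
      · intro q
        rw [hmark q]
        constructor
        · rintro ⟨x, hxP, hxo, hxr⟩
          exact ⟨x, List.mem_append.mpr (Or.inl hxP), hxo, hxr⟩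
        · rintro ⟨x, hxP, hxo, hxr⟩
          rcases List.mem_append.mp hxP with hxP | hxp
          · exact ⟨x, hxP, hxo, hxr⟩
          · rw [List.mem_singleton] at hxp
            subst hxp
            exact absurd hxo.2 hopen
      · exact hcls
      · rw [tally_append_skip r c grid g P p (by simp [hopen]), ← hts]

lemma solve_char (r c : Int) (grid : List String) (g : (Int × Int) → Int)
    (hinv : LabInv r c grid g) (hst : stableL r c grid g) :
    solve r c grid = PySem.Int.toStr (tally r c grid g (allCells r c)).1 ++ " " ++
      PySem.Int.toStr (tally r c grid g (allCells r c)).2 := by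
  rw [solve_eq]
  have h := A_fold_spec r c grid g hinv hst (allCells r c) [] rfl (V0init r c) 0 0
    ?_ ?_ rfl
  · rw [show ([] : List (Int × Int)) ++ allCells r c = allCells r c from rfl] at h
    rw [h]
  · intro q
    constructor
    · rintro ⟨hqin, hv⟩
      rw [vGet_V0init r c q hqin] at hv
      cases hv
    · rintro ⟨x, hx, -⟩
      cases hx
  · intro q t hq _
    have hv := hq.2
    rw [vGet_V0init r c q hq.1] at hv
    cases hv

-- ---------- B evaluates to the same tally ----------

-- the per-character counter dict Source B builds, as a named fold (keyed by the final label)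
def ctrFold (r c : Int) (grid : List String) (g : (Int × Int) → Int) (ch : Char)
    (l : List (Int × Int)) (d : PySem.Dict Int Int) : PySem.Dict Int Int :=
  l.foldl (fun d p =>
    if cellAt grid p.1 p.2 = ch then d.insert (g p) (d.getD (g p) 0 + 1) else d) d

def chCtr (r c : Int) (grid : List String) (g : (Int × Int) → Int) (ch : Char) :
    PySem.Dict Int Int :=
  ctrFold r c grid g ch (openCells r c grid) PySem.Dict.empty

lemma ctrFold_cons (r c : Int) (grid : List String) (g : (Int × Int) → Int) (ch : Char)
    (p : Int × Int) (l : List (Int × Int)) (d : PySem.Dict Int Int) :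
    ctrFold r c grid g ch (p :: l) d =
      ctrFold r c grid g ch l
        (if cellAt grid p.1 p.2 = ch then d.insert (g p) (d.getD (g p) 0 + 1) else d) := rfl

lemma pairSplit (r c : Int) (grid : List String) (g : (Int × Int) → Int) :
    ∀ (l : List (Int × Int)) (d1 d2 : PySem.Dict Int Int),
      l.foldl (fun sw p =>
        if cellAt grid p.1 p.2 = 'k' then (sw.1.insert (g p) (sw.1.getD (g p) 0 + 1), sw.2)
        else if cellAt grid p.1 p.2 = 'v' then (sw.1, sw.2.insert (g p) (sw.2.getD (g p) 0 + 1))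
        else sw) (d1, d2) =
      (ctrFold r c grid g 'k' l d1, ctrFold r c grid g 'v' l d2) := by
  intro l
  induction l with
  | nil => intro d1 d2; rfl
  | cons p l ih =>
    intro d1 d2
    rw [List.foldl_cons, ctrFold_cons, ctrFold_cons]
    by_cases hk : cellAt grid p.1 p.2 = 'k'
    · have hv : ¬ cellAt grid p.1 p.2 = 'v' := by rw [hk]; decide
      simp only [if_pos hk, if_neg hv]
      exact ih _ _
    · by_cases hv : cellAt grid p.1 p.2 = 'v'
      · simp only [if_pos hv, if_neg hk]
        exact ih _ _
      · simp only [if_neg hk, if_neg hv]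
        exact ih _ _

lemma sw_fold_eq (r c : Int) (grid : List String) (g : (Int × Int) → Int) :
    ((graphL r c grid g).items.foldl (fun sw kv =>
      if cellAt grid kv.1.1 kv.1.2 = 'k' then (sw.1.insert kv.2 (sw.1.getD kv.2 0 + 1), sw.2)
      else if cellAt grid kv.1.1 kv.1.2 = 'v' then (sw.1, sw.2.insert kv.2 (sw.2.getD kv.2 0 + 1))
      else sw)
      ((PySem.Dict.empty : PySem.Dict Int Int), (PySem.Dict.empty : PySem.Dict Int Int))) =
    (chCtr r c grid g 'k', chCtr r c grid g 'v') := by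
  rw [items_graphL, List.foldl_map]
  exact pairSplit r c grid g (openCells r c grid) PySem.Dict.empty PySem.Dict.empty

lemma counter_getD_gen (r c : Int) (grid : List String) (g : (Int × Int) → Int) (ch : Char)
    (v : Int) :
    ∀ (l : List (Int × Int)) (d : PySem.Dict Int Int),
      (ctrFold r c grid g ch l d).getD v 0
        = d.getD v 0 +
          ((l.countP (fun q => (g q == v) && decide (cellAt grid q.1 q.2 = ch)) : Nat) : Int) := by
  intro l
  induction l with
  | nil => intro d; simp [ctrFold]
  | cons p l ih =>
    intro d
    rw [ctrFold_cons, List.countP_cons, ih]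
    by_cases hc : cellAt grid p.1 p.2 = ch
    · rw [if_pos hc]
      by_cases hv : v = g p
      · rw [PySem.Dict.getD_insert, if_pos hv]
        have hb : (if ((g p == v) && decide (cellAt grid p.1 p.2 = ch)) = true then 1 else 0)
            = 1 := by simp [hc, hv]
        rw [hb, hv]
        push_cast
        ring
      · rw [PySem.Dict.getD_insert, if_neg hv]
        have hb : (if ((g p == v) && decide (cellAt grid p.1 p.2 = ch)) = true then 1 else 0)
            = 0 := by simp [hc, Ne.symm hv]
        rw [hb]
        push_cast
        ring
    · rw [if_neg hc]
      have hb : (if ((g p == v) && decide (cellAt grid p.1 p.2 = ch)) = true then 1 else 0)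
          = 0 := by simp [hc]
      rw [hb]
      push_cast
      ring

lemma counter_getD (r c : Int) (grid : List String) (g : (Int × Int) → Int) (ch : Char)
    (v : Int) : (chCtr r c grid g ch).getD v 0 = cCnt r c grid g ch v := by
  unfold chCtr
  rw [counter_getD_gen r c grid g ch v (openCells r c grid) PySem.Dict.empty]
  rw [PySem.Dict.getD_empty]
  unfold cCnt
  ring

-- Python's ordered dedup of the final labels lists each component's least id, in order
lemma dedup_fold_reps (r c : Int) (grid : List String) (g : (Int × Int) → Int)
    (hinv : LabInv r c grid g) (hst : stableL r c grid g) :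
    ∀ (S P : List (Int × Int)) (s : PySem.Set Int), openCells r c grid = P ++ S →
      s = (P.filter (fun p => g p == idOf c p)).map g →
      (∀ v : Int, v ∈ s ↔ ∃ x ∈ P, g x = v) →
      S.foldl (fun s p => PySem.Set.add s (g p)) s =
        ((P ++ S).filter (fun p => g p == idOf c p)).map g := by
  intro S
  induction S with
  | nil =>
    intro P s h hs _
    simpa using hs
  | cons p S ih =>
    intro P s h hs hchar
    have h' : openCells r c grid = (P ++ [p]) ++ S := by rw [h]; simp
    have hpoc : p ∈ openCells r c grid := by
      rw [h]; exact List.mem_append.mpr (Or.inr List.mem_cons_self)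
    have hPsub : ∀ x ∈ P, x ∈ openCells r c grid := by
      intro x hx; rw [h]; exact List.mem_append.mpr (Or.inl hx)
    rw [List.foldl_cons, show P ++ p :: S = (P ++ [p]) ++ S from by simp]
    by_cases hrep : g p = idOf c p
    · have hnot : g p ∉ s := by
        intro hmem
        obtain ⟨x, hxP, hxv⟩ := (hchar (g p)).mp hmem
        have h1 : g x ≤ idOf c x := (hinv x (hPsub x hxP)).2
        have h2 : idOf c x < idOf c p :=
          idOf_lt_of_mem_prefix c (openCells r c grid) P S p x
            (pairwise_idOf_openCells r c grid) h hxP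
        omega
      rw [PySem.Set.add_of_not_mem hnot]
      apply ih (P ++ [p]) (s ++ [g p]) h'
      · have hcond : (g p == idOf c p) = true := by simp [hrep]
        rw [List.filter_append, List.map_append, hs, List.filter_singleton]
        simp only [hcond]
        rfl
      · intro v
        constructor
        · intro hv
          rcases List.mem_append.mp hv with hv | hv
          · obtain ⟨x, hxP, hxv⟩ := (hchar v).mp hv
            exact ⟨x, List.mem_append.mpr (Or.inl hxP), hxv⟩
          · rw [List.mem_singleton] at hv
            exact ⟨p, List.mem_append.mpr (Or.inr List.mem_cons_self), hv.symm⟩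
        · rintro ⟨x, hxP, hxv⟩
          rcases List.mem_append.mp hxP with hxP | hxp
          · exact List.mem_append.mpr (Or.inl ((hchar v).mpr ⟨x, hxP, hxv⟩))
          · rw [List.mem_singleton] at hxp
            subst hxp
            exact List.mem_append.mpr (Or.inr (List.mem_singleton.mpr hxv.symm))
    · obtain ⟨m, hmo, hmr, hmid, hmlt⟩ := nonrep_witness r c grid g hinv p hpoc hrep
      have hmP : m ∈ P :=
        mem_prefix_of_idOf_lt c (openCells r c grid) P S p m
          (pairwise_idOf_openCells r c grid) h hmo hmlt
      have hgm : g m = g p := (label_const_of_reach r c grid g hst p m hmr).symm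
      have hmem : g p ∈ s := (hchar (g p)).mpr ⟨m, hmP, hgm⟩
      rw [PySem.Set.add_of_mem hmem]
      apply ih (P ++ [p]) s h'
      · have hcond : (g p == idOf c p) = false := by simp [hrep]
        rw [List.filter_append, List.filter_singleton, hcond]
        simpa using hs
      · intro v
        rw [hchar v]
        constructor
        · rintro ⟨x, hxP, hxv⟩
          exact ⟨x, List.mem_append.mpr (Or.inl hxP), hxv⟩
        · rintro ⟨x, hxP, hxv⟩
          rcases List.mem_append.mp hxP with hxP | hxp
          · exact ⟨x, hxP, hxv⟩
          · rw [List.mem_singleton] at hxp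
            subst hxp
            exact ⟨m, hmP, by rw [hgm, hxv]⟩

lemma dedup_values_eq (r c : Int) (grid : List String) (g : (Int × Int) → Int)
    (hinv : LabInv r c grid g) (hst : stableL r c grid g) :
    PySem.List.dedup ((openCells r c grid).map g) =
      ((openCells r c grid).filter (fun p => g p == idOf c p)).map g := by
  have h1 : PySem.List.dedup ((openCells r c grid).map g) =
      ((openCells r c grid).map g).foldl PySem.Set.add [] := rfl
  rw [h1, List.foldl_map]
  have := dedup_fold_reps r c grid g hinv hst (openCells r c grid) [] [] rfl rfl
    (by simp)
  simpa using this

set_option maxHeartbeats 2000000 in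
lemma solve_alt_char (r c : Int) (grid : List String) (g : (Int × Int) → Int)
    (hEq : labFix (initLabels r c grid) = graphL r c grid g)
    (hinv : LabInv r c grid g) (hst : stableL r c grid g) :
    solve_alt r c grid = PySem.Int.toStr (tally r c grid g (allCells r c)).1 ++ " " ++
      PySem.Int.toStr (tally r c grid g (allCells r c)).2 := by
  simp only [solve_alt]
  rw [hEq, sw_fold_eq r c grid g, values_graphL,
    dedup_values_eq r c grid g hinv hst]
  have hfold : (((openCells r c grid).filter (fun p => g p == idOf c p)).map g).foldl
      (fun (tw : Int × Int) l =>
        if (chCtr r c grid g 'k').getD l 0 > (chCtr r c grid g 'v').getD l 0 then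
          (tw.1 + (chCtr r c grid g 'k').getD l 0, tw.2)
        else (tw.1, tw.2 + (chCtr r c grid g 'v').getD l 0)) ((0 : Int), (0 : Int)) =
      tally r c grid g (allCells r c) := by
    rw [List.foldl_map]
    unfold tally
    rw [show (allCells r c).filter
        (fun p => (g p == idOf c p) && decide (cellAt grid p.1 p.2 ≠ '#')) =
      (openCells r c grid).filter (fun p => g p == idOf c p) from by
        unfold openCells; rw [List.filter_filter]]
    apply PySem.List.foldl_congr_mem
    intro a p _
    rw [counter_getD r c grid g 'k' (g p), counter_getD r c grid g 'v' (g p)]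
    rfl
  exact congrArg₂ (fun x y : Int => PySem.Int.toStr x ++ " " ++ PySem.Int.toStr y)
    (congrArg Prod.fst hfold) (congrArg Prod.snd hfold)

-- ===== VERDICT (by name: the statement is the Claim_ definition above) =====
theorem solve_spec : Claim_equal_solve := by
  intro r c grid _ _
  unfold Spec_solve
  obtain ⟨g, hEq, hinv, hst⟩ := labFix_spec r c grid
  rw [solve_char r c grid g hinv hst, solve_alt_char r c grid g hEq hinv hst]
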